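-- pv_equiv track=rewrite | github.com/nandini-emerson/test-aieng | code/agent.py | _extract_timeline_from_llm
-- ===== SOURCE A (Python) =====
-- from typing import Any, Dict, List, Optional, Tuple
--
-- def _extract_timeline_from_llm(llm_text: str) -> List[str]:
--     if not llm_text:
--         return []
--     try:
--         low = llm_text.lower()
--         start = low.find("timeline")
--         if start >= 0:
--             sub = llm_text[start:]
--             lines = sub.splitlines()
--             timeline = []
--             for line in lines:
--                 line = line.strip()
--                 if not line:
--                     continue
--                 if any(ch.isdigit() for ch in line[:4]) or line.lower().startswith("timeline"):
--                     timeline.append(line)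
--                 elif timeline:
--                     timeline[-1] = timeline[-1] + " " + line
--             return timeline[:20]
--     except Exception:
--         pass
--     return []
-- ===== SOURCE B (Python) =====
-- from typing import Any, Dict, List, Optional, Tuple
--
--
-- def _is_header(line: str) -> bool:
--     return any(ch.isdigit() for ch in line[:4]) or line.lower().startswith("timeline")
--
--
-- def _extract_timeline_from_llm(llm_text: str) -> List[str]:
--     # Staged passes: clean the lines first, then split them into header-led
--     # groups and join each group with single spaces (no last-entry mutation).
--     if not llm_text:
--         return []
--     start = llm_text.lower().find("timeline")
--     if start < 0:
--         return []
--     lines = [s for s in (l.strip() for l in llm_text[start:].splitlines()) if s]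
--     out = []
--     i, n = 0, len(lines)
--     while i < n:
--         if not _is_header(lines[i]):
--             i += 1
--             continue
--         j = i + 1
--         while j < n and not _is_header(lines[j]):
--             j += 1
--         out.append(" ".join(lines[i:j]))
--         i = j
--     return out[:20]
-- ===== Notes on version B (the rewrite author's own statement) =====
-- stated objective: alternative
-- what changed: Replaces A's single fold that appends headers and concatenates each continuation line onto the last appended entry by staged passes: first clean/filter the stripped lines, then split them into header-led groups by scanning ahead to the next header, joining each whole group with single spaces at once.
import Mathlib
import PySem

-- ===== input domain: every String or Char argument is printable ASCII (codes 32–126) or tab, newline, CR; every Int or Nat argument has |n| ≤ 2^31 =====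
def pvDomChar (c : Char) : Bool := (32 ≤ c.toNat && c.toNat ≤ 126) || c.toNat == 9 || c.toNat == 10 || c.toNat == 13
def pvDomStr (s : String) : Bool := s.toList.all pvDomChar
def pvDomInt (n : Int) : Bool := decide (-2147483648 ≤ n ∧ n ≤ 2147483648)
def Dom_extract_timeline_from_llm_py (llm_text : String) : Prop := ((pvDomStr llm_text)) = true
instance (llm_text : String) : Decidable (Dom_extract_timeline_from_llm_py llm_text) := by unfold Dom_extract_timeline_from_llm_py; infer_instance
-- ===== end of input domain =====

-- B replaces A's single fold that mutates the last appended entry by staged passes: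
-- clean the lines, then split into header-led groups and join each group (objective: alternative).

-- ===== PORT A =====
-- any(ch.isdigit() for ch in line[:4]) or line.lower().startswith("timeline")
def pvIsHeaderA (line : List Char) : Bool :=
  (PySem.Chars.slice line none (some 4)).any PySem.Chars.isdigit
    || PySem.Chars.startswith (PySem.Chars.lower line) ("timeline".toList)

-- the body of A's `for line in lines:` loop (state = the `timeline` list)
def pvStepA (acc : List (List Char)) (raw : List Char) : List (List Char) :=
  let line := PySem.Chars.strip raw
  if line = [] then acc
  else if pvIsHeaderA line then acc ++ [line]
  else match acc.getLast? with
    | none => acc                                   -- `elif timeline:` is false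
    | some last => acc.dropLast ++ [last ++ ' ' :: line]  -- timeline[-1] += " " + line

def extract_timeline_from_llm_py (llm_text : String) : List String :=
  let cs := llm_text.toList
  if cs = [] then []
  else
    let low := PySem.Chars.lower cs
    let start := PySem.Chars.find low ("timeline".toList)
    if 0 ≤ start then
      let sub := PySem.Chars.slice cs (some start) none
      let lines := PySem.Chars.splitlines sub
      let timeline := lines.foldl pvStepA []
      (PySem.List.slice timeline none (some 20)).map (fun l => String.ofList l)
    else []

-- ===== PORT B =====
def pvIsHeaderB (line : List Char) : Bool :=
  (PySem.Chars.slice line none (some 4)).any PySem.Chars.isdigit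
    || PySem.Chars.startswith (PySem.Chars.lower line) ("timeline".toList)

-- `[s for s in (l.strip() for l in …) if s]`
def pvCleanLines (ls : List (List Char)) : List (List Char) :=
  ls.filterMap (fun l => let s := PySem.Chars.strip l; if s = [] then none else some s)

-- B's outer while loop: skip non-headers; at a header, the inner while loop scans
-- ahead to the next header (takeWhile/dropWhile) and the group is joined with " ".
def pvGroups : List (List Char) → List (List Char)
  | [] => []
  | l :: rest =>
    if pvIsHeaderB l then
      PySem.Chars.join [' '] (l :: rest.takeWhile (fun x => !pvIsHeaderB x))
        :: pvGroups (rest.dropWhile (fun x => !pvIsHeaderB x))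
    else pvGroups rest
termination_by ls => ls.length
decreasing_by
· exact Nat.lt_succ_of_le (List.length_dropWhile_le _ _)
· exact Nat.lt_succ_self _

def extract_timeline_from_llm_py_alt (llm_text : String) : List String :=
  let cs := llm_text.toList
  if cs = [] then []
  else
    let start := PySem.Chars.find (PySem.Chars.lower cs) ("timeline".toList)
    if start < 0 then []
    else
      let lines := pvCleanLines (PySem.Chars.splitlines (PySem.Chars.slice cs (some start) none))
      (PySem.List.slice (pvGroups lines) none (some 20)).map (fun l => String.ofList l)

-- ===== PRECONDITION & SPEC =====
def Spec_extract_timeline_from_llm_py (llm_text : String) (out : List String) : Prop := out = extract_timeline_from_llm_py_alt llm_text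
instance (llm_text : String) (out : List String) : Decidable (Spec_extract_timeline_from_llm_py llm_text out) := by unfold Spec_extract_timeline_from_llm_py; infer_instance

-- ===== CLAIM (what is proved, stated in full; the proofs are below) =====
def Claim_equal_extract_timeline_from_llm_py : Prop := ∀ (llm_text : String), Dom_extract_timeline_from_llm_py llm_text → Spec_extract_timeline_from_llm_py llm_text (extract_timeline_from_llm_py llm_text)

-- ===== LEMMAS AND PROOFS =====

theorem pvHeader_eq : pvIsHeaderB = pvIsHeaderA := rfl

-- A's loop body on an already-cleaned line
def pvStep2 (acc : List (List Char)) (l : List Char) : List (List Char) :=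
  if pvIsHeaderA l then acc ++ [l]
  else match acc.getLast? with
    | none => acc
    | some last => acc.dropLast ++ [last ++ ' ' :: l]

-- " " ++ t for each continuation line, concatenated
def pvPref (ts : List (List Char)) : List Char := (ts.map (fun t => ' ' :: t)).flatten

theorem pvJoin_eq_pref : ∀ (ts : List (List Char)) (l : List Char),
    PySem.Chars.join [' '] (l :: ts) = l ++ pvPref ts := by
  intro ts
  induction ts with
  | nil => intro l; simp [PySem.Chars.join_singleton, pvPref]
  | cons t ts ih =>
    intro l
    rw [PySem.Chars.join_cons_cons, ih t]
    simp [pvPref]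

theorem pvCleanA : ∀ (ls : List (List Char)) (acc : List (List Char)),
    List.foldl pvStepA acc ls = List.foldl pvStep2 acc (pvCleanLines ls) := by
  intro ls
  induction ls with
  | nil => intro acc; rfl
  | cons l ls ih =>
    intro acc
    by_cases h : PySem.Chars.strip l = []
    · simpa [pvCleanLines, h, pvStepA] using ih acc
    · simp only [List.foldl_cons, pvCleanLines, List.filterMap_cons, if_neg h]
      rw [show pvStepA acc l = pvStep2 acc (PySem.Chars.strip l) by
        simp [pvStepA, pvStep2, h]]
      exact ih _

theorem pvStep2_ne_nil (acc : List (List Char)) (l : List Char) (h : acc ≠ []) :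
    pvStep2 acc l ≠ [] := by
  unfold pvStep2
  split
  · simp
  · split
    · exact h
    · simp

theorem pvPrefixInv : ∀ (ls xs ys : List (List Char)), ys ≠ [] →
    List.foldl pvStep2 (xs ++ ys) ls = xs ++ List.foldl pvStep2 ys ls := by
  intro ls
  induction ls with
  | nil => intro xs ys _; rfl
  | cons x ls ih =>
    intro xs ys hys
    simp only [List.foldl_cons]
    rw [show pvStep2 (xs ++ ys) x = xs ++ pvStep2 ys x by
      unfold pvStep2
      split
      · simp
      · obtain ⟨last, hl⟩ := Option.isSome_iff_exists.mp (List.getLast?_isSome.mpr hys)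
        rw [List.getLast?_append_of_ne_nil xs hys, hl]
        rw [List.dropLast_append]
        simp [List.isEmpty_iff, hys]]
    exact ih xs (pvStep2 ys x) (pvStep2_ne_nil ys x hys)

theorem pvRun : ∀ (ls : List (List Char)) (c : List Char),
    List.foldl pvStep2 [c] ls
      = (c ++ pvPref (ls.takeWhile (fun x => !pvIsHeaderA x)))
        :: List.foldl pvStep2 [] (ls.dropWhile (fun x => !pvIsHeaderA x)) := by
  intro ls
  induction ls with
  | nil => intro c; simp [pvPref]
  | cons x ls ih =>
    intro c
    by_cases hx : pvIsHeaderA x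
    · rw [List.foldl_cons, show pvStep2 [c] x = [c] ++ [x] by simp [pvStep2, hx],
          pvPrefixInv ls [c] [x] (by simp)]
      simp only [List.takeWhile_cons, List.dropWhile_cons, hx, Bool.not_true, Bool.false_eq_true,
        if_false, pvPref, List.map_nil, List.flatten_nil, List.append_nil, List.foldl_cons]
      rw [show pvStep2 [] x = [x] by simp [pvStep2, hx]]
      rfl
    · rw [List.foldl_cons, show pvStep2 [c] x = [c ++ ' ' :: x] by simp [pvStep2, hx],
          ih (c ++ ' ' :: x)]
      simp only [List.takeWhile_cons, List.dropWhile_cons, hx, Bool.not_false]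
      simp [pvPref]

theorem pvFoldA_eq_groups : ∀ (ls : List (List Char)),
    List.foldl pvStep2 [] ls = pvGroups ls := by
  intro ls
  fun_induction pvGroups ls with
  | case1 => rfl
  | case2 l ls h ih =>
    simp only [pvHeader_eq] at h ih ⊢
    rw [List.foldl_cons, show pvStep2 [] l = [l] by simp [pvStep2, h],
        pvRun, ih, pvJoin_eq_pref]
  | case3 l ls h ih =>
    simp only [pvHeader_eq] at h ih ⊢
    rw [List.foldl_cons, show pvStep2 [] l = [] by simp [pvStep2, h], ih]

-- ===== VERDICT (by name: the statement is the Claim_ definition above) =====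
theorem extract_timeline_from_llm_py_spec : Claim_equal_extract_timeline_from_llm_py := by
  intro llm_text _
  unfold Spec_extract_timeline_from_llm_py
  unfold extract_timeline_from_llm_py extract_timeline_from_llm_py_alt
  simp only
  by_cases hcs : llm_text.toList = []
  · simp [hcs]
  · simp only [if_neg hcs]
    by_cases hs : 0 ≤ PySem.Chars.find (PySem.Chars.lower llm_text.toList) ("timeline".toList)
    · rw [if_pos hs, if_neg (by omega)]
      rw [pvCleanA, pvFoldA_eq_groups]
    · rw [if_neg hs, if_pos (by omega)]
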